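-- pv_equiv track=rewrite | github.com/caileymm/tip-102 | unit2_session2.py | count_endangered_species
-- ===== SOURCE A (Python) =====
-- def count_endangered_species(endangered_species, observed_species):
--     # set for endangered species ?
--     # counter
--
--     count = 0
--     es_set = set(endangered_species)
--
--     for index_i, char_i in enumerate(observed_species):
--         for index_j, char_j in enumerate(es_set):
--             if char_i == char_j:
--                 count += 1
--
--     return count
-- ===== SOURCE B (Python) =====
-- def count_endangered_species(endangered_species, observed_species):
--     es_set = set(endangered_species)
--     counts = {}
--     for species in observed_species:
--         counts[species] = counts.get(species, 0) + 1
--     total = 0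
--     for species, cnt in counts.items():
--         if species in es_set:
--             total += cnt
--     return total
-- ===== Notes on version B (the rewrite author's own statement) =====
-- stated objective: faster
-- what changed: Replaces A's per-occurrence scan over the whole endangered set with a frequency table built in one pass over the observations, then one grouped pass over the distinct observed species summing their counts when endangered.
import Mathlib
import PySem

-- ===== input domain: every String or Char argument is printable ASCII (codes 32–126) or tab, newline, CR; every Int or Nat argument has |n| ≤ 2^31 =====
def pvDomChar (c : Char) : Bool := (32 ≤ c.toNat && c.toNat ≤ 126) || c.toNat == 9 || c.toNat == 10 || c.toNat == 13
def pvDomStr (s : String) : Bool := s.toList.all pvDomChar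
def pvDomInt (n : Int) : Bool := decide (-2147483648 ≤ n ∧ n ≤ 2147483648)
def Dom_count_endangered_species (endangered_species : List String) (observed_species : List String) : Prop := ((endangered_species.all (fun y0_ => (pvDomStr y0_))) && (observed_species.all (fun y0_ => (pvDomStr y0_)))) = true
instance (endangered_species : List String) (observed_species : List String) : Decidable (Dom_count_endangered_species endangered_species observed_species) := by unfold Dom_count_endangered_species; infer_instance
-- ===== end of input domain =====

-- ===== PORT A =====
def count_endangered_species (endangered_species : List String) (observed_species : List String) : Int :=
  let es_set := PySem.Set.ofList endangered_species
  observed_species.foldl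
    (fun count char_i =>
      es_set.foldl (fun count char_j => if char_i == char_j then count + 1 else count) count)
    0

-- ===== PORT B =====
-- B: one pass builds a frequency dict of the observations, then one grouped pass
-- over its distinct keys sums the counts of endangered species.
def count_endangered_species_alt (endangered_species : List String) (observed_species : List String) : Int :=
  let es_set := PySem.Set.ofList endangered_species
  let counts := observed_species.foldl (fun d s => d.insert s (d.getD s 0 + 1)) PySem.Dict.empty
  counts.items.foldl (fun total kv => if es_set.contains kv.1 then total + kv.2 else total) 0

-- ===== PRECONDITION & SPEC =====
def Spec_count_endangered_species (endangered_species : List String) (observed_species : List String) (out : Int) : Prop := out = count_endangered_species_alt endangered_species observed_species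
instance (endangered_species : List String) (observed_species : List String) (out : Int) : Decidable (Spec_count_endangered_species endangered_species observed_species out) := by unfold Spec_count_endangered_species; infer_instance

-- ===== CLAIM (what is proved, stated in full; the proofs are below) =====
def Claim_equal_count_endangered_species : Prop := ∀ (endangered_species : List String) (observed_species : List String), Dom_count_endangered_species endangered_species observed_species → Spec_count_endangered_species endangered_species observed_species (count_endangered_species endangered_species observed_species)

-- ===== LEMMAS AND PROOFS =====

-- A conditional accumulating fold is the sum of a 0/ite map.
lemma foldl_if_add {α : Type} (l : List α) (p : α → Bool) (g : α → Int) (a : Int) :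
    l.foldl (fun t x => if p x then t + g x else t) a
      = a + (l.map (fun x => if p x then g x else 0)).sum := by
  have h : (fun (t : Int) (x : α) => if p x then t + g x else t)
      = fun t x => t + (if p x then g x else 0) := by
    funext t x; by_cases hp : p x <;> simp [hp]
  rw [h, PySem.List.foldl_add]

-- A's nested loops as a sum over the observations.
lemma A_sum (es os : List String) :
    count_endangered_species es os
      = (os.map (fun x => (((PySem.Set.ofList es).countP (fun y => x == y) : Nat) : Int))).sum := by
  simp only [count_endangered_species, PySem.List.foldl_if_add_one, PySem.List.foldl_add,
    zero_add]

-- B's grouped pass as a sum over the distinct observed species.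
lemma B_sum (es os : List String) :
    count_endangered_species_alt es os
      = ((PySem.Set.ofList os).map
          (fun k => if (PySem.Set.ofList es).contains k then (os.count k : Int) else 0)).sum := by
  simp only [count_endangered_species_alt, PySem.Dict.foldl_insert_getD_add_one_eq_counter,
    PySem.Dict.items_counter, foldl_if_add, zero_add, List.map_map]
  simp [Function.comp_def]

-- ===== VERDICT (by name: the statement is the Claim_ definition above) =====
theorem count_endangered_species_spec : Claim_equal_count_endangered_species := by
  intro es os _
  unfold Spec_count_endangered_species
  rw [A_sum, B_sum, Finset.sum_list_map_count, Finset.sum_list_map_count]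
  have hfin : (PySem.Set.ofList os).toFinset = os.toFinset := by
    ext x; simp [List.mem_toFinset, PySem.Set.mem_ofList]
  rw [hfin]
  refine Finset.sum_congr rfl (fun m hm => ?_)
  have hcnt1 : (PySem.Set.ofList os).count m = 1 :=
    List.count_eq_one_of_mem (PySem.Set.nodup_ofList os)
      ((PySem.Set.mem_ofList os m).2 (List.mem_toFinset.1 hm))
  have hpc : (PySem.Set.ofList es).countP (fun y => m == y) = (PySem.Set.ofList es).count m := by
    refine List.countP_congr (fun a _ => ?_)
    by_cases h : m = a
    · simp [h]
    · simp [h]; exact fun e => h e.symm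
  by_cases hme : m ∈ es
  · simp [hpc, hcnt1, hme]
  · have h0 : (PySem.Set.ofList es).count m = 0 :=
      List.count_eq_zero_of_not_mem (fun h => hme ((PySem.Set.mem_ofList es m).1 h))
    simp [hpc, h0, hcnt1, hme]
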